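-- pv_equiv track=rewrite | github.com/pawel2000pl/GrafyLab | graphs.py | graphCenterFromDistanceMatrix
-- ===== SOURCE A (Python) =====
-- def graphCenterFromDistanceMatrix(distanceMatrix):
--
--     totalDistanceFromOthers = {}
--     finalTotalDistance = {}
--
--     for index, row in enumerate(distanceMatrix, start=1):  # wierzcholki liczymy od 1
--         totalDistanceFromOthers[index] = sum(row)
--
--     minVal = min(totalDistanceFromOthers.values())
--     indexes_of_centre_vertices = [k for k, v in totalDistanceFromOthers.items() if v == minVal]
--     for i in indexes_of_centre_vertices:
--         finalTotalDistance[i] = totalDistanceFromOthers[i]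
--
--     return finalTotalDistance
-- ===== SOURCE B (Python) =====
-- def graphCenterFromDistanceMatrix(distanceMatrix):
--     # Single pass: running minimal row sum and the dict of its minimisers.
--     best = None
--     result = {}
--     index = 0
--     for row in distanceMatrix:
--         index += 1
--         s = sum(row)
--         if best is None or s < best:
--             best = s
--             result = {index: s}
--         elif s == best:
--             result[index] = s
--     if best is None:
--         raise ValueError("graphCenterFromDistanceMatrix: empty distance matrix")
--     return result
-- ===== Notes on version B (the rewrite author's own statement) =====
-- stated objective: simpler
-- what changed: Replaces A's three phases (build a full index->sum dict, take min over its values, filter and rebuild) by one pass that keeps a running best sum and the dict of current minimisers, resetting it when a strictly smaller sum appears.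
import Mathlib
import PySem

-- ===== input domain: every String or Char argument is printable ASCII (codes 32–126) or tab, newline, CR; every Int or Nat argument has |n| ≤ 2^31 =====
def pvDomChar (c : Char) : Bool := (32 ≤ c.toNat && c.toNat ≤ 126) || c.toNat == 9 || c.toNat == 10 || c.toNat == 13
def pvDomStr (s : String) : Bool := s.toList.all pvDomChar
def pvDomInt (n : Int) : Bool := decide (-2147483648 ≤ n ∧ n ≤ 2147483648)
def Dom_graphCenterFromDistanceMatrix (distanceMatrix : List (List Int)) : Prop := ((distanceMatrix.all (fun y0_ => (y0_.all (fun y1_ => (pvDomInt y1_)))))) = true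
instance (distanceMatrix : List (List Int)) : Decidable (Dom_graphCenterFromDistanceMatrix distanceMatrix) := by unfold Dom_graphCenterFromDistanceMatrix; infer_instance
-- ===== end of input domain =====

-- B replaces A's three phases (sum dict, min over values, filter+rebuild) by one pass
-- keeping a running best sum and the list of current minimisers ("simpler" objective).
-- Both Pythons raise ValueError on the empty matrix, hence Pre_ below.

-- ===== PORT A =====
def graphCenterFromDistanceMatrix (distanceMatrix : List (List Int)) : List (Int × Int) :=
  let totalDistanceFromOthers : PySem.Dict Int Int :=
    (PySem.List.enumerate distanceMatrix 1).foldl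
      (fun d p => d.insert p.1 p.2.sum) PySem.Dict.empty
  match PySem.List.min? totalDistanceFromOthers.values (fun v => v) with
  | none => []  -- Python: min() of an empty sequence raises ValueError; excluded by Pre_
  | some minVal =>
    let idxs := (totalDistanceFromOthers.items.filter (fun p => p.2 == minVal)).map (·.1)
    -- totalDistanceFromOthers[i]: the key i is always present, so getD with default 0 is exact
    (idxs.foldl (fun d i => d.insert i (totalDistanceFromOthers.getD i 0)) PySem.Dict.empty).items

-- ===== PORT B =====
def graphCenterFromDistanceMatrix_alt (distanceMatrix : List (List Int)) : List (Int × Int) :=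
  (distanceMatrix.foldl
    (fun (st : Option Int × List (Int × Int) × Int) row =>
      let index := st.2.2 + 1
      let s := row.sum
      match st.1 with
      | none => (some s, ([(index, s)], index))
      | some b =>
        if s < b then (some s, ([(index, s)], index))
        else if s == b then (some b, (st.2.1 ++ [(index, s)], index))
        else (some b, (st.2.1, index)))
    (none, ([], 0))).2.1
  -- 'if best is None: raise ValueError' fires exactly on the empty matrix, excluded by Pre_

-- ===== PRECONDITION & SPEC =====
-- Pre_ excludes exactly the empty matrix, on which the Python A raises ValueError (min() of
-- an empty sequence); B also raises ValueError there.
def Pre_graphCenterFromDistanceMatrix (distanceMatrix : List (List Int)) : Prop :=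
  distanceMatrix ≠ []
instance (distanceMatrix : List (List Int)) : Decidable (Pre_graphCenterFromDistanceMatrix distanceMatrix) := by unfold Pre_graphCenterFromDistanceMatrix; infer_instance
def pvWitness_graphCenterFromDistanceMatrix : List (List Int) := [[0, 1], [1, 0]]
def Spec_graphCenterFromDistanceMatrix (distanceMatrix : List (List Int)) (out : List (Int × Int)) : Prop := out = graphCenterFromDistanceMatrix_alt distanceMatrix
instance (distanceMatrix : List (List Int)) (out : List (Int × Int)) : Decidable (Spec_graphCenterFromDistanceMatrix distanceMatrix out) := by unfold Spec_graphCenterFromDistanceMatrix; infer_instance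

-- ===== CLAIM (what is proved, stated in full; the proofs are below) =====
def Claim_equal_graphCenterFromDistanceMatrix : Prop := ∀ (distanceMatrix : List (List Int)), Dom_graphCenterFromDistanceMatrix distanceMatrix → Pre_graphCenterFromDistanceMatrix distanceMatrix → Spec_graphCenterFromDistanceMatrix distanceMatrix (graphCenterFromDistanceMatrix distanceMatrix)

-- ===== LEMMAS AND PROOFS =====

-- the (1-based index, row sum) pairs
def pvPairs (dm : List (List Int)) : List (Int × Int) :=
  (PySem.List.enumerate dm 1).map (fun p => (p.1, p.2.sum))

-- min of the row sums
def pvMinS (dm : List (List Int)) : Option Int :=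
  PySem.List.min? (dm.map List.sum) (fun v => v)

-- the common normal form: the pairs achieving the minimal sum, in index order
def pvCenters (dm : List (List Int)) : List (Int × Int) :=
  match pvMinS dm with
  | none => []
  | some m => (pvPairs dm).filter (fun p => p.2 == m)

theorem pvPairs_map_snd (dm : List (List Int)) :
    (pvPairs dm).map (·.2) = dm.map List.sum := by
  unfold pvPairs
  rw [List.map_map]
  have h : ((fun p : Int × Int => p.2) ∘ (fun p : Int × List Int => (p.1, p.2.sum)))
      = (List.sum ∘ (fun p : Int × List Int => p.2)) := rfl
  rw [h, ← List.map_map, PySem.List.map_snd_enumerate]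

theorem pvPairs_fst_nodup (dm : List (List Int)) :
    ((pvPairs dm).map (·.1)).Nodup := by
  have h := PySem.List.pairwise_lt_enumerate dm 1
  have : ((pvPairs dm).map (·.1)).Pairwise (· < ·) := by
    simp only [pvPairs, List.map_map]
    exact List.Pairwise.map _ (by intro a b hab; simpa using hab) h
  exact this.nodup

theorem pvPairs_append_singleton (xs : List (List Int)) (x : List Int) :
    pvPairs (xs ++ [x]) = pvPairs xs ++ [((xs.length : Int) + 1, x.sum)] := by
  simp [pvPairs, PySem.List.enumerate_append, PySem.List.enumerate_cons,
    PySem.List.enumerate_nil]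
  omega

theorem pvMinS_append_singleton (xs : List (List Int)) (x : List Int) :
    pvMinS (xs ++ [x]) = some (match pvMinS xs with
      | none => x.sum
      | some b => min b x.sum) := by
  unfold pvMinS
  rw [List.map_append]
  cases hxs : xs.map List.sum with
  | nil =>
    have h0 : PySem.List.min? ([] : List Int) (fun v => v) = none :=
      (PySem.List.min?_eq_none_iff _ _).mpr rfl
    simp [PySem.List.min?_id_cons, h0]
  | cons y t =>
    simp only [List.cons_append]
    rw [PySem.List.min?_id_cons, PySem.List.min?_id_cons, List.foldl_append]
    simp

theorem pvMinS_isMin (dm : List (List Int)) (b : Int) (h : pvMinS dm = some b) :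
    ∀ p ∈ pvPairs dm, b ≤ p.2 := by
  intro p hp
  have hmem : p.2 ∈ (pvPairs dm).map (·.2) := List.mem_map_of_mem hp
  rw [pvPairs_map_snd] at hmem
  exact PySem.List.min?_isMin h p.2 hmem

-- A's result is the normal form
theorem pvA_eq_centers (dm : List (List Int)) :
    graphCenterFromDistanceMatrix dm = pvCenters dm := by
  have hfresh : ∀ p ∈ PySem.List.enumerate dm 1,
      (PySem.Dict.empty : PySem.Dict Int Int).contains p.1 = false := by
    intro p _; simp [PySem.Dict.contains_empty]
  have hnodup : ((PySem.List.enumerate dm 1).map (·.1)).Nodup := by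
    have := pvPairs_fst_nodup dm
    simpa [pvPairs, List.map_map, Function.comp_def] using this
  have hitems :
      ((PySem.List.enumerate dm 1).foldl
        (fun d p => d.insert p.1 p.2.sum) PySem.Dict.empty).items = pvPairs dm := by
    rw [PySem.Dict.items_foldl_insert_fresh (PySem.List.enumerate dm 1)
      (fun p => p.1) (fun p => p.2.sum) PySem.Dict.empty hfresh hnodup]
    simp [pvPairs, PySem.Dict.empty]
  have hmain : ∀ (td : PySem.Dict Int Int), td.items = pvPairs dm →
      td.values = dm.map List.sum →
      (match PySem.List.min? td.values (fun v => v) with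
       | none => ([] : List (Int × Int))
       | some minVal =>
         (((td.items.filter (fun p => p.2 == minVal)).map (fun p => p.1)).foldl
            (fun d i => d.insert i (td.getD i 0)) PySem.Dict.empty).items) = pvCenters dm := by
    intro td hitems hvalues
    have hkeys : td.keys.Nodup := by
      simpa [PySem.Dict.keys, hitems] using pvPairs_fst_nodup dm
    rw [hvalues]
    unfold pvCenters pvMinS
    cases hmin : PySem.List.min? (dm.map List.sum) (fun v => v) with
    | none => simp
    | some minVal =>
      simp only
      have hfresh2 : ∀ i ∈ ((td.items.filter (fun p => p.2 == minVal)).map (fun p => p.1)),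
          (PySem.Dict.empty : PySem.Dict Int Int).contains i = false := by
        intro i _; simp [PySem.Dict.contains_empty]
      have hnodup2 : (((td.items.filter (fun p => p.2 == minVal)).map (fun p => p.1)).map (fun i => i)).Nodup := by
        rw [List.map_id_fun']
        refine List.Nodup.sublist ?_ hkeys
        exact List.Sublist.map _ List.filter_sublist
      have hrw := PySem.Dict.items_foldl_insert_fresh
        ((td.items.filter (fun p => p.2 == minVal)).map (fun p => p.1)) (fun i => i)
        (fun i => td.getD i 0) PySem.Dict.empty hfresh2 hnodup2
      rw [hrw]
      simp only [List.map_map]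
      have hempty : (PySem.Dict.empty : PySem.Dict Int Int).items = [] := rfl
      rw [hempty, List.nil_append, hitems]
      have hcongr : ∀ p ∈ (pvPairs dm).filter (fun p => p.2 == minVal),
          ((fun a => (a, td.getD a 0)) ∘ fun p : Int × Int => p.1) p = p := by
        intro p hp
        have hpmem : p ∈ td.items := by
          rw [hitems]; exact List.mem_of_mem_filter hp
        have hget : td.getD p.1 0 = p.2 := by
          rcases p with ⟨i, v⟩
          exact PySem.Dict.getD_of_mem_items td hpmem hkeys 0
        simp [hget]
      exact (List.map_congr_left hcongr).trans (List.map_id _)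
  have hvalues :
      ((PySem.List.enumerate dm 1).foldl
        (fun d p => d.insert p.1 p.2.sum) PySem.Dict.empty).values = dm.map List.sum := by
    simp only [PySem.Dict.values, hitems]
    exact pvPairs_map_snd dm
  exact hmain _ hitems hvalues

-- B's fold invariant: state = (running min, current minimisers, rows seen)
theorem pvB_invariant (dm : List (List Int)) :
    dm.foldl
      (fun (st : Option Int × List (Int × Int) × Int) row =>
        let index := st.2.2 + 1
        let s := row.sum
        match st.1 with
        | none => (some s, ([(index, s)], index))
        | some b =>
          if s < b then (some s, ([(index, s)], index))
          else if s == b then (some b, (st.2.1 ++ [(index, s)], index))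
          else (some b, (st.2.1, index)))
      (none, ([], 0))
    = (pvMinS dm, (pvCenters dm, (dm.length : Int))) := by
  induction dm using List.reverseRecOn with
  | nil => simp [pvMinS, pvCenters, PySem.List.min?]
  | append_singleton xs x ih =>
    rw [List.foldl_append, ih]
    simp only [List.foldl_cons, List.foldl_nil]
    rw [pvMinS_append_singleton]
    cases hmin : pvMinS xs with
    | none =>
      have hxs : xs = [] := by
        have h := hmin
        unfold pvMinS at h
        have := (PySem.List.min?_eq_none_iff _ _).mp h
        simpa using this
      subst hxs
      have h1 : pvMinS [x] = some x.sum := by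
        simp [pvMinS, PySem.List.min?_id_cons]
      simp [pvCenters, h1, pvPairs, PySem.List.enumerate_cons, PySem.List.enumerate_nil]
    | some b =>
      simp only
      have hcent : pvCenters xs = (pvPairs xs).filter (fun p => p.2 == b) := by
        simp [pvCenters, hmin]
      by_cases hlt : x.sum < b
      · have hminb : min b x.sum = x.sum := by omega
        simp only [if_pos hlt, pvCenters, pvMinS_append_singleton, hmin, hminb,
          pvPairs_append_singleton]
        have hfilt : (pvPairs xs).filter (fun p => p.2 == x.sum) = [] := by
          rw [List.filter_eq_nil_iff]
          intro p hp
          have := pvMinS_isMin xs b hmin p hp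
          simp only [beq_iff_eq]
          omega
        simp [List.filter_append, hfilt]
      · by_cases heq : x.sum = b
        · have hminb : min b x.sum = b := by omega
          simp only [if_neg hlt, pvCenters, pvMinS_append_singleton, hmin, hminb,
            pvPairs_append_singleton]
          simp [List.filter_append, heq]
        · have hminb : min b x.sum = b := by
            have := lt_of_le_of_ne (not_lt.mp hlt) (Ne.symm heq)
            omega
          simp only [if_neg hlt, pvCenters, pvMinS_append_singleton, hmin, hminb,
            pvPairs_append_singleton]
          simp [List.filter_append, heq]

theorem pvB_eq_centers (dm : List (List Int)) :
    graphCenterFromDistanceMatrix_alt dm = pvCenters dm := by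
  unfold graphCenterFromDistanceMatrix_alt
  rw [pvB_invariant]

-- ===== VERDICT (by name: the statement is the Claim_ definition above) =====
theorem graphCenterFromDistanceMatrix_spec : Claim_equal_graphCenterFromDistanceMatrix := by
  intro dm _ _
  unfold Spec_graphCenterFromDistanceMatrix
  rw [pvA_eq_centers, pvB_eq_centers]
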